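-- pv_equiv track=rewrite | github.com/ijgnd/anki__pdf_viewer_with_pdfjs | src/copied/fuzzy_panel.py | process_search_string_withStart
-- ===== SOURCE A (Python) =====
-- def process_search_string_withStart(search_terms, keys, max):
--     """inspired by find_in_files from sublimelesszk"""
--     search_terms = split_search_terms_withStart(search_terms)
--     results = []
--     for lent in keys:
--         for presence, atstart, term in search_terms:
--             if term.islower():
--                 i = lent.lower()
--             else:
--                 i = lent
--
--             # if presence and term not in i:
--                 # break
--             # elif not presence and term in i:
--                 # break
--
--             if presence:
--                 if term not in i:
--                     break
--                 elif atstart and not i.startswith(term):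
--                     break
--             else:   # not in
--                 if term in i:
--                     break
--                 elif atstart and i.startswith(term):
--                     break
--         else:
--             results.append(lent)
--     return results
--
-- def split_search_terms_withStart(search_string):
--     """
--     Split a search-spec (for find in files) into tuples:
--     (posneg, string)
--     posneg: True: must be contained, False must not be contained
--     string: what must (not) be contained
--     """
--     in_quotes = False
--     in_neg = False
--
--     at_start = False
--
--     pos = 0
--     str_len = len(search_string)
--     results = []
--     current_snippet = ''
--
--     literal_quote_sign = '"'
--     exclude_sign = '!'
--     startswith_sign = "_"
--
--     while pos < str_len:
--         if search_string[pos:].startswith(literal_quote_sign):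
--             in_quotes = not in_quotes
--             if not in_quotes:
--                 # finish this snippet
--                 if current_snippet:
--                     results.append((in_neg, at_start, current_snippet))
--                 in_neg = False
--                 current_snippet = ''
--             pos += 1
--         elif search_string[pos:].startswith(exclude_sign) and not in_quotes and not current_snippet:
--             in_neg = True
--             pos += 1
--         elif search_string[pos:].startswith(startswith_sign) and not in_quotes and not current_snippet:
--             at_start = True
--             pos += 1
--         elif search_string[pos] in (' ', '\t') and not in_quotes:
--             # push current snippet
--             if current_snippet:
--                 results.append((in_neg, at_start, current_snippet))
--             in_neg = False
--             at_start = False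
--             current_snippet = ''
--             pos += 1
--         else:
--             current_snippet += search_string[pos]
--             pos += 1
--     if current_snippet:
--         results.append((in_neg, at_start, current_snippet))
--     return [(not in_neg, at_start, s) for in_neg, at_start, s in results]
-- ===== SOURCE B (Python) =====
-- def process_search_string_withStart(search_terms, keys, max):
--     """Term-major progressive filtering over a survivor list, driven by a
--     fold-style single-state parser (instead of A's key-major loop with a
--     for/else break and a multi-branch while parser)."""
--     survivors = list(keys)
--     for presence, atstart, term in split_search_terms_withStart(search_terms):
--         survivors = [k for k in survivors if _passes(presence, atstart, term, k)]
--     return survivors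
--
-- def _passes(presence, atstart, term, lent):
--     i = lent.lower() if term.islower() else lent
--     if presence:
--         return i.startswith(term) if atstart else (term in i)
--     return term not in i
--
-- def split_search_terms_withStart(search_string):
--     # fold over characters with one state tuple; terms are emitted already
--     # in their final (presence, atstart, text) form
--     state = (False, False, False, '', [])
--     for c in search_string:
--         state = _step(state, c)
--     _q, in_neg, at_start, cur, out = state
--     return _flush(in_neg, at_start, cur, out)
--
-- def _flush(in_neg, at_start, cur, out):
--     return out + [(not in_neg, at_start, cur)] if cur else out
--
-- def _step(state, c):
--     in_quotes, in_neg, at_start, cur, out = state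
--     if in_quotes:
--         if c == '"':
--             return (False, False, at_start, '', _flush(in_neg, at_start, cur, out))
--         return (True, in_neg, at_start, cur + c, out)
--     if c == '"':
--         return (True, in_neg, at_start, cur, out)
--     if c in ' \t':
--         return (False, False, False, '', _flush(in_neg, at_start, cur, out))
--     if not cur and c == '!':
--         return (False, True, at_start, '', out)
--     if not cur and c == '_':
--         return (False, in_neg, True, '', out)
--     return (False, in_neg, at_start, cur + c, out)
-- ===== Notes on version B (the rewrite author's own statement) =====
-- stated objective: alternative
-- what changed: A's key-major scan (inner per-term loop with for/else break) and multi-branch while parser are replaced by term-major progressive filtering of a survivor list with a simplified per-term predicate, driven by a fold-style single-state parser that emits terms already in final (presence, atstart, text) form.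
import Mathlib
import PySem

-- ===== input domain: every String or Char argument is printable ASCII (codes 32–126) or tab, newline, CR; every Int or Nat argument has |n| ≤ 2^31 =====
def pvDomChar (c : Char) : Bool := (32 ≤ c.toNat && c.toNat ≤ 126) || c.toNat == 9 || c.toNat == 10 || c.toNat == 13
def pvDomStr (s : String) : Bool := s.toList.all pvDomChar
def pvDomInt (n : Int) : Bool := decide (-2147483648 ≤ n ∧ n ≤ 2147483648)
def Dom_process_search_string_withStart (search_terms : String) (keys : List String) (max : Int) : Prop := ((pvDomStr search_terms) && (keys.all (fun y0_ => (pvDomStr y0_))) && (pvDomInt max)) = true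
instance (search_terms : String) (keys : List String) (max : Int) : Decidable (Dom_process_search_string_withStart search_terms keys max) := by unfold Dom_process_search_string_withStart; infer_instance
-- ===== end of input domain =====

-- B: fold-style single-state parser emitting final (presence, atstart, term) tuples,
-- plus term-major filtering of a survivor list with a simplified per-term predicate;
-- alternative decomposition, same cost.

-- ===== PORT A =====

-- Python str.islower() restricted to ASCII (exact on Dom: ASCII cased chars are exactly
-- the letters): some cased character and no uppercase one.  Hand-ported; used by both sides.
def pyStrIslower (s : String) : Bool :=
  s.toList.any PySem.Chars.islower && s.toList.all (fun c => !PySem.Chars.isupper c)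

-- the while-loop of A's split_search_terms_withStart: pos always advances by 1, so it is a
-- recursion over the remaining characters with the same five branches in the same order
def splitGo : List Char → Bool → Bool → Bool → List Char → List (Bool × Bool × List Char) → List (Bool × Bool × List Char)
  | [], _, in_neg, at_start, cur, res =>
      -- the 'if current_snippet: results.append(...)' after the loop
      if cur.isEmpty then res else res ++ [(in_neg, at_start, cur)]
  | c :: rest, in_quotes, in_neg, at_start, cur, res =>
      if c = '"' then
        if in_quotes then
          -- toggled to False: finish this snippet (at_start is NOT reset, as in the Python)
          splitGo rest false false at_start [] (if cur.isEmpty then res else res ++ [(in_neg, at_start, cur)])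
        else
          splitGo rest true in_neg at_start cur res
      else if c = '!' && !in_quotes && cur.isEmpty then
        splitGo rest in_quotes true at_start cur res
      else if c = '_' && !in_quotes && cur.isEmpty then
        splitGo rest in_quotes in_neg true cur res
      else if (c = ' ' || c = '\t') && !in_quotes then
        splitGo rest in_quotes false false [] (if cur.isEmpty then res else res ++ [(in_neg, at_start, cur)])
      else
        splitGo rest in_quotes in_neg at_start (cur ++ [c]) res

def split_search_terms_withStart (search_string : String) : List (Bool × Bool × String) :=
  (splitGo search_string.toList false false false [] []).map
    (fun t => (!t.1, t.2.1, String.ofList t.2.2))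

-- the inner 'for presence, atstart, term in search_terms: … else: append' of A,
-- true iff the for-loop finishes without break
def checkKey : List (Bool × Bool × String) → String → Bool
  | [], _ => true
  | (presence, atstart, term) :: rest, lent =>
      let i := if pyStrIslower term then PySem.Str.lower lent else lent
      if presence then
        if !(PySem.Str.isIn term i) then false
        else if atstart && !(PySem.Str.startswith i term) then false
        else checkKey rest lent
      else
        if PySem.Str.isIn term i then false
        else if atstart && PySem.Str.startswith i term then false
        else checkKey rest lent

def process_search_string_withStart (search_terms : String) (keys : List String) (max : Int) : List String :=
  let terms := split_search_terms_withStart search_terms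
  keys.foldl (fun results lent => if checkKey terms lent then results ++ [lent] else results) []

-- ===== PORT B =====

-- Source B's _flush
def flushB (in_neg at_start : Bool) (cur : List Char) (out : List (Bool × Bool × String)) :
    List (Bool × Bool × String) :=
  if cur.isEmpty then out else out ++ [(!in_neg, at_start, String.ofList cur)]

-- Source B's _step: one fold step over the state tuple (in_quotes, in_neg, at_start, cur, out)
def stepB (st : Bool × Bool × Bool × List Char × List (Bool × Bool × String)) (c : Char) :
    Bool × Bool × Bool × List Char × List (Bool × Bool × String) :=
  let (q, neg, ast, cur, out) := st
  if q then
    if c = '"' then (false, false, ast, [], flushB neg ast cur out)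
    else (true, neg, ast, cur ++ [c], out)
  else if c = '"' then (true, neg, ast, cur, out)
  else if c = ' ' ∨ c = '\t' then (false, false, false, [], flushB neg ast cur out)
  else if cur.isEmpty && c = '!' then (false, true, ast, [], out)
  else if cur.isEmpty && c = '_' then (false, neg, true, [], out)
  else (false, neg, ast, cur ++ [c], out)

-- Source B's split_search_terms_withStart (fold over the characters, then flush)
def split_alt (search_string : String) : List (Bool × Bool × String) :=
  let st := search_string.toList.foldl stepB (false, false, false, [], [])
  flushB st.2.1 st.2.2.1 st.2.2.2.1 st.2.2.2.2

-- Source B's _passes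
def passB (presence atstart : Bool) (term lent : String) : Bool :=
  let i := if pyStrIslower term then PySem.Str.lower lent else lent
  if presence then
    if atstart then PySem.Str.startswith i term else PySem.Str.isIn term i
  else !(PySem.Str.isIn term i)

def process_search_string_withStart_alt (search_terms : String) (keys : List String) (max : Int) : List String :=
  (split_alt search_terms).foldl
    (fun survivors t => survivors.filter (fun k => passB t.1 t.2.1 t.2.2 k)) keys

-- ===== PRECONDITION & SPEC =====
def Spec_process_search_string_withStart (search_terms : String) (keys : List String) (max : Int) (out : List String) : Prop := out = process_search_string_withStart_alt search_terms keys max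
instance (search_terms : String) (keys : List String) (max : Int) (out : List String) : Decidable (Spec_process_search_string_withStart search_terms keys max out) := by unfold Spec_process_search_string_withStart; infer_instance

-- ===== CLAIM =====
def Claim_equal_process_search_string_withStart : Prop := ∀ (search_terms : String) (keys : List String) (max : Int), Dom_process_search_string_withStart search_terms keys max → Spec_process_search_string_withStart search_terms keys max (process_search_string_withStart search_terms keys max)

-- ===== LEMMAS AND PROOFS =====

def convT (t : Bool × Bool × List Char) : Bool × Bool × String := (!t.1, t.2.1, String.ofList t.2.2)

lemma flushB_eq (neg ast : Bool) (cur : List Char) (res : List (Bool × Bool × List Char)) :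
    flushB neg ast cur (res.map convT)
      = ((if cur.isEmpty then res else res ++ [(neg, ast, cur)]).map convT) := by
  by_cases h : cur.isEmpty <;> simp [flushB, h, convT]

-- the fold-with-state parser of B computes A's recursive parser (up to the final flip map)
lemma foldB_eq_splitGo (cs : List Char) (q neg ast : Bool) (cur : List Char)
    (res : List (Bool × Bool × List Char)) :
    (let st := cs.foldl stepB (q, neg, ast, cur, res.map convT)
     flushB st.2.1 st.2.2.1 st.2.2.2.1 st.2.2.2.2)
      = (splitGo cs q neg ast cur res).map convT := by
  induction cs generalizing q neg ast cur res with
  | nil =>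
      simp only [List.foldl_nil, splitGo]
      simpa using flushB_eq neg ast cur res
  | cons c rest ih =>
      simp only [List.foldl_cons]
      cases q with
      | true =>
          by_cases hq : c = '"'
          · simp only [splitGo, stepB, hq, if_pos rfl]
            rw [flushB_eq]
            simpa using ih false false ast [] _
          · have h1 : ¬ (c = '!' && !true && cur.isEmpty) = true := by simp
            have h2 : ¬ (c = '_' && !true && cur.isEmpty) = true := by simp
            have h3 : ¬ ((c = ' ' || c = '\t') && !true) = true := by simp
            simp only [splitGo, stepB, hq, if_neg hq, h1, h2, h3, if_false, Bool.false_eq_true]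
            simpa using ih true neg ast (cur ++ [c]) res
      | false =>
          by_cases hq : c = '"'
          · simp only [splitGo, stepB, hq, if_pos rfl]
            simpa using ih true neg ast cur res
          · by_cases hs : c = ' ' ∨ c = '\t'
            · have hne : ¬ (c = '!' && !false && cur.isEmpty) = true := by
                rcases hs with h | h <;> simp [h]
              have hnu : ¬ (c = '_' && !false && cur.isEmpty) = true := by
                rcases hs with h | h <;> simp [h]
              have hsb : ((c = ' ' || c = '\t') && !false) = true := by
                rcases hs with h | h <;> simp [h]
              simp only [splitGo, stepB, if_neg hq, hq, hne, hnu, hsb, if_true, if_pos hs,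
                Bool.false_eq_true, if_false]
              rw [flushB_eq]
              simpa using ih false false false [] _
            · by_cases he : cur.isEmpty && c = '!'
              · have h1 : (c = '!' && !false && cur.isEmpty) = true := by
                  simp_all
                simp only [splitGo, stepB, if_neg hq, hq, if_neg hs, if_pos he, h1,
                  Bool.false_eq_true, if_false, if_true]
                have hcur : cur = [] := by
                  rcases Bool.and_eq_true_iff.mp he with ⟨h, _⟩
                  simpa [List.isEmpty_iff] using h
                subst hcur
                simpa using ih false true ast [] res
              · by_cases hu : cur.isEmpty && c = '_'
                · have h1 : ¬ (c = '!' && !false && cur.isEmpty) = true := by simp_all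
                  have h2 : (c = '_' && !false && cur.isEmpty) = true := by simp_all
                  simp only [splitGo, stepB, if_neg hq, hq, if_neg hs, if_neg he, if_pos hu,
                    h1, h2, Bool.false_eq_true, if_false, if_true]
                  have hcur : cur = [] := by
                    rcases Bool.and_eq_true_iff.mp hu with ⟨h, _⟩
                    simpa [List.isEmpty_iff] using h
                  subst hcur
                  simpa using ih false neg true [] res
                · have h1 : ¬ (c = '!' && !false && cur.isEmpty) = true := by
                    intro h; exact he (by simp_all)
                  have h2 : ¬ (c = '_' && !false && cur.isEmpty) = true := by
                    intro h; exact hu (by simp_all)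
                  have h3 : ¬ ((c = ' ' || c = '\t') && !false) = true := by
                    simp only [Bool.and_true, Bool.not_false]
                    intro h
                    exact hs (by simpa using h)
                  simp only [splitGo, stepB, if_neg hq, hq, if_neg hs, if_neg he, if_neg hu,
                    h1, h2, h3, Bool.false_eq_true, if_false]
                  simpa using ih false neg ast (cur ++ [c]) res

lemma split_alt_eq (s : String) : split_alt s = split_search_terms_withStart s := by
  unfold split_alt split_search_terms_withStart
  simpa using foldB_eq_splitGo s.toList false false false [] []

-- startswith implies containment (prefix is infix), so B's simplified predicate agrees
lemma startswith_isIn (i term : String) :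
    PySem.Str.startswith i term = true → PySem.Str.isIn term i = true := by
  intro h
  rw [PySem.Str.isIn_iff_infix]
  exact ((PySem.Chars.startswith_iff _ _).mp (by simpa using h)).isInfix

-- A's per-key inner loop succeeds iff every term's single-term predicate of B holds
lemma checkKey_eq_all (terms : List (Bool × Bool × String)) (lent : String) :
    checkKey terms lent = terms.all (fun t => passB t.1 t.2.1 t.2.2 lent) := by
  induction terms with
  | nil => rfl
  | cons t rest ih =>
      obtain ⟨presence, atstart, term⟩ := t
      simp only [checkKey, passB, List.all_cons, ih]
      cases presence <;> cases atstart <;>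
        cases h1 : PySem.Str.isIn term (if pyStrIslower term then PySem.Str.lower lent else lent) <;>
        cases h2 : PySem.Str.startswith (if pyStrIslower term then PySem.Str.lower lent else lent) term <;>
        first
          | (exfalso; have := startswith_isIn _ _ h2; rw [h1] at this; exact Bool.false_ne_true this)
          | simp

-- term-major repeated filtering computes the conjunction of all per-term filters
lemma foldl_filter_all {α : Type} (f : α → String → Bool) (ts : List α) (ks : List String) :
    ts.foldl (fun r t => r.filter (fun k => f t k)) ks
      = ks.filter (fun k => ts.all (fun t => f t k)) := by
  induction ts generalizing ks with
  | nil => simp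
  | cons t ts ih =>
      simp only [List.foldl_cons, ih, List.filter_filter, List.all_cons]
      exact List.filter_congr (fun k _ => by rw [Bool.and_comm])

-- ===== VERDICT =====
theorem process_search_string_withStart_spec : Claim_equal_process_search_string_withStart := by
  intro search_terms keys max _
  unfold Spec_process_search_string_withStart process_search_string_withStart process_search_string_withStart_alt
  rw [split_alt_eq, foldl_filter_all]
  rw [PySem.List.foldl_append_if (p := checkKey (split_search_terms_withStart search_terms)) (f := fun x => x)]
  simp only [List.nil_append, List.map_id_fun']
  exact List.filter_congr (fun k _ => checkKey_eq_all _ k)
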